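-- pv_equiv track=rewrite | github.com/Python-Best-Coder/ConsoleOs | o.py | encrypt_string
-- ===== SOURCE A (Python) =====
-- import string
--
-- def encrypt_number(number):
--     x = 0
--     toreturn = ''
--     while True:
--         if not x + 4 > number:
--             toreturn += '#'
--             x += 4
--         if not x + 3 > number:
--             toreturn += '*'
--             x += 3
--         elif not x + 2 > number:
--             toreturn += ':'
--             x += 2
--         elif not x + 1 > number:
--             toreturn += '.'
--             x += 1
--         else:
--             break
--
--     return toreturn
--
-- def encrypt_string(strings:str):
--     strings = strings
--     values = {}
--     toreturn = ''
--     valuekeys = string.ascii_letters + string.punctuation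
--     for x,valuekey in enumerate(valuekeys):
--         values[valuekey] = x + 1
--     for letter in strings:
--         if letter in values:
--             toreturn += encrypt_number(values[letter])
--         elif letter == ' ':
--             toreturn += ' '
--
--         toreturn += '/'
--     return toreturn
-- ===== SOURCE B (Python) =====
-- import string
--
-- _SUFFIX = ['', '.', ':', '*', '#', '#.', '#:']
-- _INDEX = {c: i + 1 for i, c in enumerate(string.ascii_letters + string.punctuation)}
--
--
-- def encrypt_string(strings: str):
--     pieces = []
--     for letter in strings:
--         n = _INDEX.get(letter)
--         if n is not None:
--             q, r = divmod(n, 7)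
--             pieces.append('#*' * q + _SUFFIX[r] + '/')
--         elif letter == ' ':
--             pieces.append(' /')
--         else:
--             pieces.append('/')
--     return ''.join(pieces)
-- ===== Notes on version B (the rewrite author's own statement) =====
-- stated objective: simpler
-- what changed: Replaces encrypt_number's greedy while-loop with a closed form ('#*' * (n // 7) + a 7-entry remainder table) and builds the output by joining per-character pieces instead of repeated string concatenation.
import Mathlib
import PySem

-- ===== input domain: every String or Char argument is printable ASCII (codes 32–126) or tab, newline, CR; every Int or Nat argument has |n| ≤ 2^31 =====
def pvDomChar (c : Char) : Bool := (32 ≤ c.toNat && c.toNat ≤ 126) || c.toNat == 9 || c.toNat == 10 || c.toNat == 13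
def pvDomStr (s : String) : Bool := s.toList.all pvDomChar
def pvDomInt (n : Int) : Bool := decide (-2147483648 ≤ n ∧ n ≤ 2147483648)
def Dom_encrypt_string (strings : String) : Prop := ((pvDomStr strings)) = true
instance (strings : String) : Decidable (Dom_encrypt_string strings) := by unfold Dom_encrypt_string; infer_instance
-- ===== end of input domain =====

-- B replaces encrypt_number's greedy while-loop by the closed form '#*' * (n // 7) + remainder table (simpler); return value only.

-- ===== PORT A =====
-- string.ascii_letters + string.punctuation
def pvValuekeys : List Char :=
  "abcdefghijklmnopqrstuvwxyzABCDEFGHIJKLMNOPQRSTUVWXYZ!\"#$%&'()*+,-./:;<=>?@[\\]^_`{|}~".toList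

-- the 'while True' loop of encrypt_number; fuel only makes it total (the loop adds ≥ 1 to x
-- each iteration and stops once x ≥ number, so fuel number.toNat + 1 is never exhausted)
def pvEncNumLoop : Nat → Int → Int → List Char → List Char
  | 0, _, _, toreturn => toreturn
  | fuel + 1, number, x, toreturn =>
    let p := if x + 4 > number then (toreturn, x) else (toreturn ++ ['#'], x + 4)
    if ¬ (p.2 + 3 > number) then pvEncNumLoop fuel number (p.2 + 3) (p.1 ++ ['*'])
    else if ¬ (p.2 + 2 > number) then pvEncNumLoop fuel number (p.2 + 2) (p.1 ++ [':'])
    else if ¬ (p.2 + 1 > number) then pvEncNumLoop fuel number (p.2 + 1) (p.1 ++ ['.'])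
    else p.1

def pvEncryptNumber (number : Int) : List Char := pvEncNumLoop (number.toNat + 1) number 0 []

def encrypt_string (strings : String) : String :=
  let values : PySem.Dict Char Int :=
    (PySem.List.enumerate pvValuekeys 0).foldl (fun d p => d.insert p.2 (p.1 + 1)) PySem.Dict.empty
  String.ofList (strings.toList.foldl (fun toreturn letter =>
    let toreturn :=
      if values.contains letter then toreturn ++ pvEncryptNumber ((values.get? letter).getD 0)
      else if letter = ' ' then toreturn ++ [' ']
      else toreturn
    toreturn ++ ['/']) [])

-- ===== PORT B =====
def pvSuffix : List (List Char) := [[], ['.'], [':'], ['*'], ['#'], ['#', '.'], ['#', ':']]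

def pvIndex : PySem.Dict Char Int :=
  (PySem.List.enumerate pvValuekeys 0).foldl (fun d p => d.insert p.2 (p.1 + 1)) PySem.Dict.empty

def pvEncPiece (n : Int) : List Char :=
  (List.replicate (PySem.Int.floordiv n 7).toNat ['#', '*']).flatten ++
    ((PySem.List.pyGet? pvSuffix (PySem.Int.mod n 7)).getD [])

def encrypt_string_alt (strings : String) : String :=
  String.ofList ((strings.toList.map (fun letter =>
    match pvIndex.get? letter with
    | some n => pvEncPiece n ++ ['/']
    | none => if letter = ' ' then [' ', '/'] else ['/'])).flatten)

-- ===== PRECONDITION & SPEC =====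
def Spec_encrypt_string (strings : String) (out : String) : Prop := out = encrypt_string_alt strings
instance (strings : String) (out : String) : Decidable (Spec_encrypt_string strings out) := by unfold Spec_encrypt_string; infer_instance

-- ===== CLAIM (what is proved, stated in full; the proofs are below) =====
def Claim_equal_encrypt_string : Prop := ∀ (strings : String), Dom_encrypt_string strings → Spec_encrypt_string strings (encrypt_string strings)

-- ===== LEMMAS AND PROOFS =====

-- A's per-letter contribution (the body of its for-loop, without the leading accumulator)
def pvStepA (letter : Char) : List Char :=
  (if pvIndex.contains letter then pvEncryptNumber ((pvIndex.get? letter).getD 0)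
   else if letter = ' ' then [' '] else []) ++ ['/']

-- B's per-letter contribution
def pvStepB (letter : Char) : List Char :=
  match pvIndex.get? letter with
  | some n => pvEncPiece n ++ ['/']
  | none => if letter = ' ' then [' ', '/'] else ['/']

lemma pvFoldA (l : List Char) (acc : List Char) :
    l.foldl (fun toreturn letter =>
      (if pvIndex.contains letter then toreturn ++ pvEncryptNumber ((pvIndex.get? letter).getD 0)
       else if letter = ' ' then toreturn ++ [' ']
       else toreturn) ++ ['/']) acc = acc ++ (l.map pvStepA).flatten := by
  induction l generalizing acc with
  | nil => simp
  | cons c t ih =>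
      simp only [List.foldl_cons, List.map_cons, List.flatten_cons, ih, pvStepA]
      split_ifs <;> simp

set_option maxRecDepth 8192 in
lemma pvStep_eq (c : Char) (hc : pvDomChar c = true) : pvStepA c = pvStepB c := by
  have h : c = Char.ofNat c.toNat := by simp [Char.ofNat_toNat]
  have hlt : c.toNat < 127 := by
    simp only [pvDomChar, Bool.or_eq_true, Bool.and_eq_true, decide_eq_true_eq, beq_iff_eq] at hc
    omega
  have key : ∀ m : Fin 127, pvStepA (Char.ofNat m.val) = pvStepB (Char.ofNat m.val) := by decide
  rw [h]; exact key ⟨c.toNat, hlt⟩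

-- ===== VERDICT (by name: the statement is the Claim_ definition above) =====
set_option maxRecDepth 8192 in
theorem encrypt_string_spec : Claim_equal_encrypt_string := by
  intro s hd
  show _ = _
  unfold encrypt_string encrypt_string_alt
  have hvals :
      (PySem.List.enumerate pvValuekeys 0).foldl (fun d p => d.insert p.2 (p.1 + 1)) PySem.Dict.empty
        = pvIndex := rfl
  simp only [hvals, pvFoldA]
  congr 1
  simp only [List.nil_append]
  have : ∀ c ∈ s.toList, pvStepA c = pvStepB c := by
    intro c hcmem
    have : pvDomChar c = true := by
      have := hd
      unfold Dom_encrypt_string pvDomStr at this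
      exact (List.all_eq_true.mp this) c hcmem
    exact pvStep_eq c this
  have hmap : s.toList.map pvStepA = s.toList.map pvStepB := List.map_congr_left this
  rw [hmap]
  rfl
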